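-- pv_equiv track=rewrite | github.com/AdnanKhurshid26/Computer-Networks-Lab | LRC/LRC.py | lrcencode
-- ===== SOURCE A (Python) =====
-- def buildFrames(input, frameSize):
--     output = []
--     for i in range(0, len(input), frameSize):
--         output.append(input[i:i+frameSize])
--     return output
--
-- def lrcencode(binaryInputString: str, dataWordFrameSize: int):
--     output = ""
--     frames = buildFrames(binaryInputString, dataWordFrameSize)
--     # Check whether we can split in to equal length of frames
--
--     # Iterate over the frames to calculate the parity
--
--     tmpFrames = frames
--     parity = ""
--     for index in range(dataWordFrameSize)[::-1]:
--         noOfOnes = 0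
--             # Count no of ones in frame
--         for frame in tmpFrames:
--             if frame[index] == "1":
--                     noOfOnes += 1
--             # Add parity bit
--         parity = ("1" if noOfOnes % 2 != 0 else "0") + parity
--
--         # Append to output
--     output = output + ''.join(tmpFrames) + parity
--
--     return output
-- ===== SOURCE B (Python) =====
-- def lrcencode(binaryInputString: str, dataWordFrameSize: int):
--     frames = [binaryInputString[i:i + dataWordFrameSize]
--               for i in range(0, len(binaryInputString), dataWordFrameSize)]
--     # row-major pass: fold each frame into a column-parity accumulator
--     parity = [0] * dataWordFrameSize
--     for frame in frames:
--         parity = [(1 - p) if frame[i] == "1" else p for i, p in enumerate(parity)]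
--     return ''.join(frames) + ''.join(str(b) for b in parity)
-- ===== Notes on version B (the rewrite author's own statement) =====
-- stated objective: alternative
-- what changed: B swaps the loop nesting: instead of A's column-by-column pass that re-counts the ones in every frame per parity bit, B folds the frames once through a column-parity accumulator list and emits it in natural order.
import Mathlib
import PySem

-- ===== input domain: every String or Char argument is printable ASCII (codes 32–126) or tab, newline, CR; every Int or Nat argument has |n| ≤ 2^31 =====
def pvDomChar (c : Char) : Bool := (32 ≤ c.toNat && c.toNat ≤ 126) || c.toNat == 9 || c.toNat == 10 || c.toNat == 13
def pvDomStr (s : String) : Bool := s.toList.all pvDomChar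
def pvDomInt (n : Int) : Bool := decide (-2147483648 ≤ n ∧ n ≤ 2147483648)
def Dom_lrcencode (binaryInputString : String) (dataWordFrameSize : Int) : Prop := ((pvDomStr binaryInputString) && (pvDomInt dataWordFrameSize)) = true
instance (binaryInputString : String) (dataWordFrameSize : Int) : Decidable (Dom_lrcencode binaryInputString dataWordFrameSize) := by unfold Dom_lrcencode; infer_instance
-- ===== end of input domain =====

-- B computes the column parity in one row-major pass (a parity accumulator folded
-- frame by frame) instead of A's column-by-column recount; objective: alternative decomposition.

-- ===== PORT A =====
-- helper buildFrames: append input[i:i+frameSize] for i in range(0, len(input), frameSize)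
def buildFrames (input : List Char) (frameSize : Int) : List (List Char) :=
  (PySem.List.pyRange 0 input.length frameSize).foldl
    (fun output i => output ++ [PySem.List.slice input (some i) (some (i + frameSize))]) []

def lrcencode (binaryInputString : String) (dataWordFrameSize : Int) : String :=
  let frames := buildFrames binaryInputString.toList dataWordFrameSize
  let tmpFrames := frames
  -- range(dataWordFrameSize)[::-1]: the [::-1] slice is reverse (PySem.List.slice?_none_none_neg_one)
  let parity := ((PySem.List.pyRange 0 dataWordFrameSize 1).reverse).foldl
    (fun parity index =>
      let noOfOnes : Int := tmpFrames.foldl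
        (fun noOfOnes frame =>
          if PySem.List.pyGet? frame index = some '1' then noOfOnes + 1 else noOfOnes) 0
      (if PySem.Int.mod noOfOnes 2 ≠ 0 then '1' else '0') :: parity) []
  String.mk (tmpFrames.flatten ++ parity)

-- ===== PORT B =====
def lrcencode_alt (binaryInputString : String) (dataWordFrameSize : Int) : String :=
  let frames := (PySem.List.pyRange 0 binaryInputString.toList.length dataWordFrameSize).map
    (fun i => PySem.List.slice binaryInputString.toList (some i) (some (i + dataWordFrameSize)))
  let parity := frames.foldl
    (fun parity frame =>
      (PySem.List.enumerate parity).map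
        (fun ip => if PySem.List.pyGet? frame ip.1 = some '1' then 1 - ip.2 else ip.2))
    (List.replicate dataWordFrameSize.toNat (0 : Int))
  String.mk (frames.flatten ++ (parity.map (fun b => PySem.Int.toChars b)).flatten)

-- ===== PRECONDITION & SPEC =====
-- Pre_ excludes exactly the inputs on which A raises: frame size 0 (ValueError from range
-- step 0) and a positive frame size not dividing the input length (IndexError on the short
-- last frame).  B raises the same exceptions there.
def Pre_lrcencode (binaryInputString : String) (dataWordFrameSize : Int) : Prop :=
  dataWordFrameSize ≠ 0 ∧
    (0 < dataWordFrameSize →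
      PySem.Int.mod (binaryInputString.toList.length : Int) dataWordFrameSize = 0)
instance (binaryInputString : String) (dataWordFrameSize : Int) : Decidable (Pre_lrcencode binaryInputString dataWordFrameSize) := by unfold Pre_lrcencode; infer_instance
def pvWitness_lrcencode : String × Int := ("101101", 3)

def Spec_lrcencode (binaryInputString : String) (dataWordFrameSize : Int) (out : String) : Prop := out = lrcencode_alt binaryInputString dataWordFrameSize
instance (binaryInputString : String) (dataWordFrameSize : Int) (out : String) : Decidable (Spec_lrcencode binaryInputString dataWordFrameSize out) := by unfold Spec_lrcencode; infer_instance

-- ===== CLAIM (what is proved, stated in full; the proofs are below) =====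
def Claim_equal_lrcencode : Prop := ∀ (binaryInputString : String) (dataWordFrameSize : Int), Dom_lrcencode binaryInputString dataWordFrameSize → Pre_lrcencode binaryInputString dataWordFrameSize → Spec_lrcencode binaryInputString dataWordFrameSize (lrcencode binaryInputString dataWordFrameSize)

-- ===== LEMMAS AND PROOFS =====
theorem pv_rev_foldl_cons {α β : Type} (g : α → β) (l : List α) (init : List β) :
    l.reverse.foldl (fun acc x => g x :: acc) init = l.map g ++ init := by
  induction l generalizing init with
  | nil => simp
  | cons a l ih => simp [List.foldl_append, ih]

theorem pv_count (idx : Int) (fs : List (List Char)) (a : Int) :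
    fs.foldl (fun n f => if PySem.List.pyGet? f idx = some '1' then n + 1 else n) a
      = a + fs.countP (fun f => decide (PySem.List.pyGet? f idx = some '1')) := by
  induction fs generalizing a with
  | nil => simp
  | cons f fs ih =>
    by_cases h : PySem.List.pyGet? f idx = some '1' <;>
      simp [h, ih, List.countP_cons] <;> push_cast <;> ring

theorem pv_mod2 (m : Int) : PySem.Int.mod m 2 = m % 2 := by
  simp [PySem.Int.mod, Int.fmod_eq_emod]

theorem pv_step_enum (f : List Char) :
    ∀ (N s : Nat) (g : Nat → Int),
      (PySem.List.enumerate ((List.range' s N).map g) (s : Int)).map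
          (fun ip => if PySem.List.pyGet? f ip.1 = some '1' then 1 - ip.2 else ip.2)
        = (List.range' s N).map
          (fun (j : Nat) => if PySem.List.pyGet? f ((j : Nat) : Int) = some '1' then 1 - g j else g j) := by
  intro N
  induction N with
  | zero => intro s g; simp [PySem.List.enumerate_nil]
  | succ N ih =>
    intro s g
    have h1 : ((s : Int) + 1) = ((s + 1 : Nat) : Int) := by push_cast; ring
    simp only [List.range'_succ, List.map_cons, PySem.List.enumerate_cons, h1, ih]

theorem pv_fold_step (fs : List (List Char)) :
    ∀ (N : Nat) (g : Nat → Int),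
      fs.foldl
          (fun parity frame =>
            (PySem.List.enumerate parity).map
              (fun ip => if PySem.List.pyGet? frame ip.1 = some '1' then 1 - ip.2 else ip.2))
          ((List.range' 0 N).map g)
        = (List.range' 0 N).map
          (fun (j : Nat) =>
            if (fs.countP (fun f => decide (PySem.List.pyGet? f ((j : Nat) : Int) = some '1'))) % 2 = 1
            then 1 - g j else g j) := by
  induction fs with
  | nil => intro N g; simp
  | cons f fs ih =>
    intro N g
    have hstep := pv_step_enum f N 0 g
    simp only [Nat.cast_zero] at hstep
    simp only [List.foldl_cons, hstep, ih]
    apply List.map_congr_left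
    intro j _
    simp only [PySem.List.pyGet?_natCast, List.countP_cons]
    by_cases hb : f[j]? = some '1' <;>
      by_cases hp : (fs.countP (fun f => decide (f[j]? = some '1'))) % 2 = 1 <;>
      [skip; skip; skip; skip] <;> simp [hb, hp, Nat.add_mod] <;> omega

theorem pv_chars_toChars1 : PySem.Int.toChars (1:Int) = ['1'] := by decide
theorem pv_chars_toChars0 : PySem.Int.toChars (0:Int) = ['0'] := by decide

theorem pv_chars (P : Nat -> Prop) [DecidablePred P] (l : List Nat) :
    ((l.map (fun j => if P j then (1:Int) else 0)).map (fun b => PySem.Int.toChars b)).flatten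
      = l.map (fun j => if P j then '1' else '0') := by
  induction l with
  | nil => simp
  | cons a l ih =>
    by_cases h : P a <;>
      simp_all [List.map_map, pv_chars_toChars1, pv_chars_toChars0]

theorem pv_main (s : String) (k : Int) : lrcencode s k = lrcencode_alt s k := by
  unfold lrcencode lrcencode_alt buildFrames
  simp only [PySem.List.foldl_append_singleton_eq_map, List.nil_append]
  congr 1
  set F := List.map (fun x => PySem.List.slice s.toList (some x) (some (x + k)))
      (PySem.List.pyRange 0 ((s.toList.length : Int)) k) with hF
  congr 1
  rw [pv_rev_foldl_cons
        (fun index => if PySem.Int.mod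
            (F.foldl (fun noOfOnes frame =>
              if PySem.List.pyGet? frame index = some '1' then noOfOnes + 1 else noOfOnes) 0) 2 ≠ 0
          then '1' else '0')]
  rw [List.append_nil, PySem.List.pyRange_one]
  have hrep : List.replicate k.toNat (0 : Int)
      = (List.range' 0 k.toNat).map (fun _ => (0 : Int)) := by
    simp [List.map_const']
  rw [hrep, pv_fold_step]
  simp only [sub_zero]
  rw [pv_chars, List.range_eq_range', List.map_map]
  apply List.map_congr_left
  intro j hj
  simp only [Function.comp, zero_add, sub_zero]
  rw [pv_count, pv_mod2, zero_add]
  split_ifs with h1 h2 <;> first | rfl | (exfalso; omega)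

-- ===== VERDICT (by name: the statement is the Claim_ definition above) =====
theorem lrcencode_spec : Claim_equal_lrcencode := by
  intro s k _ _
  unfold Spec_lrcencode
  exact pv_main s k
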